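-- pv_equiv track=rewrite | github.com/jingmeihu/ProvBuild | capture/noworkflow/Task5.py | loadTag
-- ===== SOURCE A (Python) =====
-- def loadTag(labelList):
--     # construct tagset and assign index
--     tagmap = dict()
--     for sent in labelList:
--         for i in range(len(sent)):
--             if not sent[i] in tagmap:
--                 tagmap[sent[i]] = len(tagmap)
--             sent[i] = tagmap[sent[i]]
--     #print 'Tagset size:', len(tagmap)
--
--     return tagmap
-- ===== SOURCE B (Python) =====
-- def loadTag(labelList):
--     # Phase 1: collect the distinct tags in first-seen order and number them.
--     tags = list(dict.fromkeys(t for sent in labelList for t in sent))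
--     tagmap = {t: i for i, t in enumerate(tags)}
--     # Phase 2: relabel every sentence in place.
--     for sent in labelList:
--         for i in range(len(sent)):
--             sent[i] = tagmap[sent[i]]
--     return tagmap
-- ===== Notes on version B (the rewrite author's own statement) =====
-- stated objective: alternative
-- what changed: A interleaves dict construction and relabelling in one nested scan; B first builds the tag list with an ordered dedup (dict.fromkeys) and a dict comprehension, then relabels the sentences in a separate second pass.
import Mathlib
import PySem

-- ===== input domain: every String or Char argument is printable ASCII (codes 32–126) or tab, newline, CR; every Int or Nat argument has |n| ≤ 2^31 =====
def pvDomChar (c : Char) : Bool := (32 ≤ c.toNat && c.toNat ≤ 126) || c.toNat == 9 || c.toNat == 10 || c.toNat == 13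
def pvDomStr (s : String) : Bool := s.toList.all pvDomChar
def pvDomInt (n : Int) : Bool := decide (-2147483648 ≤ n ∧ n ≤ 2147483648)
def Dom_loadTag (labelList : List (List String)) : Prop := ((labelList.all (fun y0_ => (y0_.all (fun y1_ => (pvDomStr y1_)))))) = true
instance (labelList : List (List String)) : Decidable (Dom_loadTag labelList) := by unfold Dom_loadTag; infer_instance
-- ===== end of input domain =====

-- loadTag: A numbers tags while scanning; B builds the tag table with an ordered dedup first,
-- then relabels in a second pass (alternative decomposition, same cost). Both mutate the input
-- sentences in place in Python; the equivalence proved here is about the RETURNED dict only.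


-- ===== PORT A =====
-- Python iterates `for i in range(len(sent))` reading sent[i] (still a string when read:
-- each slot is read once, before its own overwrite), so for the returned tagmap the inner
-- loop is a fold over the sentence's strings; the in-place write to sent[i] only mutates
-- the argument and does not feed the result, so it is not carried in the port.
def loadTagStep (tagmap : PySem.Dict String Int) (t : String) : PySem.Dict String Int :=
  if tagmap.contains t then tagmap else tagmap.insert t (tagmap.size : Int)

def loadTag (labelList : List (List String)) : List (String × Int) :=
  (labelList.foldl (fun tagmap sent => sent.foldl loadTagStep tagmap) PySem.Dict.empty).items

-- ===== PORT B =====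
-- tags = list(dict.fromkeys(t for sent in labelList for t in sent)); {t: i for i, t in enumerate(tags)}
-- (the second pass over labelList only mutates the argument, so it is not carried in the port)
def loadTag_alt (labelList : List (List String)) : List (String × Int) :=
  (PySem.List.enumerate (PySem.List.dedup (labelList.flatMap (fun sent => sent))) 0).map
    (fun p => (p.2, p.1))

-- ===== PRECONDITION & SPEC =====
def Spec_loadTag (labelList : List (List String)) (out : List (String × Int)) : Prop := out = loadTag_alt labelList
instance (labelList : List (List String)) (out : List (String × Int)) : Decidable (Spec_loadTag labelList out) := by unfold Spec_loadTag; infer_instance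

-- ===== CLAIM (what is proved, stated in full; the proofs are below) =====
def Claim_equal_loadTag : Prop := ∀ (labelList : List (List String)), Dom_loadTag labelList → Spec_loadTag labelList (loadTag labelList)

-- ===== LEMMAS AND PROOFS =====

-- tags of xs that are new w.r.t. already-seen ks, in order of first appearance
def freshTags (ks : List String) : List String → List String
  | [] => []
  | x :: xs => if x ∈ ks then freshTags ks xs else x :: freshTags (x :: ks) xs

theorem freshTags_congr (xs : List String) : ∀ (ks ks' : List String),
    (∀ a, a ∈ ks ↔ a ∈ ks') → freshTags ks xs = freshTags ks' xs := by
  induction xs with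
  | nil => intro _ _ _; rfl
  | cons x xs ih =>
    intro ks ks' h
    simp only [freshTags]
    by_cases hx : x ∈ ks
    · rw [if_pos hx, if_pos ((h x).mp hx)]; exact ih _ _ h
    · rw [if_neg hx, if_neg (fun hc => hx ((h x).mpr hc))]
      exact congrArg _ (ih _ _ (by intro a; simp [h a]))

theorem set_update_eq_freshTags (xs : List String) : ∀ (s : PySem.Set String),
    PySem.Set.update s xs = s ++ freshTags s xs := by
  induction xs with
  | nil => intro s; simp [PySem.Set.update_nil, freshTags]
  | cons x xs ih =>
    intro s
    rw [PySem.Set.update_cons, PySem.Set.add_eq_ite]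
    by_cases hx : x ∈ s
    · simp only [if_pos hx, freshTags, ih]
    · simp only [if_neg hx, freshTags, ih (s ++ [x])]
      rw [freshTags_congr xs (s ++ [x]) (x :: s) (by intro a; simp; tauto)]
      simp

theorem freshTags_nil_eq_dedup (xs : List String) :
    freshTags [] xs = PySem.List.dedup xs := by
  have h := set_update_eq_freshTags xs []
  rw [PySem.Set.update_nil_left] at h
  rw [PySem.List.dedup_eq_ofList]
  simpa using h.symm

theorem items_foldl_loadTagStep (xs : List String) : ∀ (d : PySem.Dict String Int),
    (xs.foldl loadTagStep d).items =
      d.items ++ (PySem.List.enumerate (freshTags d.keys xs) (d.size : Int)).map (fun p => (p.2, p.1)) := by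
  induction xs with
  | nil => intro d; simp [freshTags, PySem.List.enumerate_nil]
  | cons x xs ih =>
    intro d
    simp only [List.foldl_cons, loadTagStep]
    by_cases hc : d.contains x = true
    · have hx : x ∈ d.keys := (PySem.Dict.contains_iff_mem_keys d x).mp hc
      rw [if_pos hc, ih d, freshTags, if_pos hx]
    · have hx : x ∉ d.keys := fun hm => hc ((PySem.Dict.contains_iff_mem_keys d x).mpr hm)
      have hcf : d.contains x = false := by
        cases hcc : d.contains x
        · rfl
        · exact absurd hcc hc
      rw [if_neg hc, ih (d.insert x (d.size : Int))]
      rw [PySem.Dict.items_insert_of_not_contains d _ hcf,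
          PySem.Dict.keys_insert_of_not_contains d _ hcf]
      have hsz : (d.insert x (d.size : Int)).size = d.size + 1 := by
        simp [PySem.Dict.size, PySem.Dict.items_insert_of_not_contains d _ hcf]
      rw [hsz, freshTags, if_neg hx, PySem.List.enumerate_cons,
          freshTags_congr xs (d.keys ++ [x]) (x :: d.keys) (by intro a; simp; tauto)]
      simp [List.append_assoc]

-- ===== VERDICT (by name: the statement is the Claim_ definition above) =====
theorem loadTag_spec : Claim_equal_loadTag := by
  intro L _
  show loadTag L = loadTag_alt L
  unfold loadTag loadTag_alt
  rw [← List.foldl_flatMap] -- nested loop = loop over the flattened list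
  rw [items_foldl_loadTagStep]
  simp [PySem.Dict.empty, PySem.Dict.size, PySem.Dict.keys,
        freshTags_nil_eq_dedup, PySem.List.dedup_eq_ofList]
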